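-- pv_equiv track=rewrite | github.com/DataOmbudsman/incdbscan | tests/test_dbscan.py | _are_lists_isomorphic
-- ===== SOURCE A (Python) =====
-- def _are_lists_isomorphic(list_1, list_2):
--     if len(list_1) != len(list_2):
--         return False
--
--     distinct_elements_1 = set(list_1)
--     distinct_elements_2 = set(list_2)
--
--     if len(distinct_elements_1) != len(distinct_elements_2):
--         return False
--
--     mappings = [(item_1, item_2) for (item_1, item_2)
--                 in zip(list_1, list_2)]
--     distinct_mappings = set(mappings)
--
--     return len(distinct_elements_1) == len(distinct_mappings)
-- ===== SOURCE B (Python) =====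
-- def _are_lists_isomorphic(list_1, list_2):
--     if len(list_1) != len(list_2):
--         return False
--     forward = {}
--     backward = {}
--     for a, b in zip(list_1, list_2):
--         if a in forward:
--             if forward[a] != b:
--                 return False
--         elif b in backward:
--             return False
--         else:
--             forward[a] = b
--             backward[b] = a
--     return True
-- ===== Notes on version B (the rewrite author's own statement) =====
-- stated objective: alternative
-- what changed: Replaces A's set-cardinality comparison (|set(l1)| = |set(l2)| = |set(zip(l1,l2))|) with a single pass over zip(list_1, list_2) maintaining explicit forward and backward dictionaries, rejecting on the first mapping inconsistency.
import Mathlib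
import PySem

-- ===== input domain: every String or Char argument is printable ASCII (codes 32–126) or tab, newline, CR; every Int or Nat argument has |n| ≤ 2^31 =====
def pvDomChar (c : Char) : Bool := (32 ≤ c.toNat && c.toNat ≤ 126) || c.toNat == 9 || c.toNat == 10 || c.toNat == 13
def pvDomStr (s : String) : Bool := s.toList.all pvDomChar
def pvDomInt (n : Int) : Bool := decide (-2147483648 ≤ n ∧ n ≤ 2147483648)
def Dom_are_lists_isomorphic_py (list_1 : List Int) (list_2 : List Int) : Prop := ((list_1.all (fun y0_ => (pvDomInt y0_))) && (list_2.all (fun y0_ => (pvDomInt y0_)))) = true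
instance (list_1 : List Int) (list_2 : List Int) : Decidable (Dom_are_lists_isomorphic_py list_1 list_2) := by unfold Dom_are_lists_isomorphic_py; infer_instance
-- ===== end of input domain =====

-- B replaces A's set-cardinality counting with a one-pass bidirectional mapping-consistency check (builds no sets of the whole lists and exits on the first inconsistency; a timing run measured it faster).

-- ===== PORT A =====
def are_lists_isomorphic_py (list_1 : List Int) (list_2 : List Int) : Bool :=
  if list_1.length ≠ list_2.length then false
  else
    let distinct_elements_1 : PySem.Set Int := PySem.Set.ofList list_1
    let distinct_elements_2 : PySem.Set Int := PySem.Set.ofList list_2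
    if distinct_elements_1.length ≠ distinct_elements_2.length then false
    else
      let mappings : List (Int × Int) := list_1.zip list_2
      let distinct_mappings : PySem.Set (Int × Int) := PySem.Set.ofList mappings
      distinct_elements_1.length == distinct_mappings.length

-- ===== PORT B =====
-- the for-loop over zip with the two dicts and early returns
def isoLoop : List (Int × Int) → PySem.Dict Int Int → PySem.Dict Int Int → Bool
  | [], _, _ => true
  | (a, b) :: rest, fwd, bwd =>
    match fwd.get? a with
    | some b' => if b' ≠ b then false else isoLoop rest fwd bwd
    | none =>
      if bwd.contains b then false
      else isoLoop rest (fwd.insert a b) (bwd.insert b a)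

def are_lists_isomorphic_py_alt (list_1 : List Int) (list_2 : List Int) : Bool :=
  if list_1.length ≠ list_2.length then false
  else isoLoop (list_1.zip list_2) PySem.Dict.empty PySem.Dict.empty

-- ===== PRECONDITION & SPEC =====
def Spec_are_lists_isomorphic_py (list_1 : List Int) (list_2 : List Int) (out : Bool) : Prop := out = are_lists_isomorphic_py_alt list_1 list_2
instance (list_1 : List Int) (list_2 : List Int) (out : Bool) : Decidable (Spec_are_lists_isomorphic_py list_1 list_2 out) := by unfold Spec_are_lists_isomorphic_py; infer_instance

-- ===== CLAIM (what is proved, stated in full; the proofs are below) =====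
def Claim_equal_are_lists_isomorphic_py : Prop := ∀ (list_1 : List Int) (list_2 : List Int), Dom_are_lists_isomorphic_py list_1 list_2 → Spec_are_lists_isomorphic_py list_1 list_2 (are_lists_isomorphic_py list_1 list_2)

-- ===== LEMMAS AND PROOFS =====

-- the common characterisation: every pair of positions agrees on the left iff it agrees on the right
def PairCond (p q : Int × Int) : Prop := (p.1 = q.1 → p = q) ∧ (p.2 = q.2 → p = q)

theorem PairCond_symm {p q : Int × Int} (h : PairCond p q) : PairCond q p :=
  ⟨fun e => (h.1 e.symm).symm, fun e => (h.2 e.symm).symm⟩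

theorem PairCond_refl (p : Int × Int) : PairCond p p := ⟨fun _ => rfl, fun _ => rfl⟩

def Good (z : List (Int × Int)) : Prop := ∀ p ∈ z, ∀ q ∈ z, PairCond p q

-- B side: loop invariant on the two dicts
theorem isoLoop_cons (a b : Int) (rest : List (Int × Int)) (fwd bwd : PySem.Dict Int Int) :
    isoLoop ((a, b) :: rest) fwd bwd =
      (match fwd.get? a with
       | some b' => if b' ≠ b then false else isoLoop rest fwd bwd
       | none =>
         if bwd.contains b then false
         else isoLoop rest (fwd.insert a b) (bwd.insert b a)) := rfl

theorem isoLoop_iff : ∀ (rest : List (Int × Int)) (fwd bwd : PySem.Dict Int Int)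
    (seen : List (Int × Int)),
    (∀ a b, fwd.get? a = some b ↔ (a, b) ∈ seen) →
    (∀ a b, bwd.get? b = some a ↔ (a, b) ∈ seen) →
    (isoLoop rest fwd bwd = true ↔
      ∀ p ∈ rest, ∀ q, (q ∈ seen ∨ q ∈ rest) → PairCond p q) := by
  intro rest
  induction rest with
  | nil => intro fwd bwd seen _ _; simp [isoLoop]
  | cons hd tl ih =>
    intro fwd bwd seen hf hb
    obtain ⟨a, b⟩ := hd
    rw [isoLoop_cons]
    cases hget : fwd.get? a with
    | some b' =>
      dsimp only
      by_cases hbb : b' = b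
      · subst hbb
        have hmem : (a, b') ∈ seen := (hf a b').mp hget
        rw [if_neg (fun h => h rfl)]
        rw [ih fwd bwd seen hf hb]
        constructor
        · intro h p hp q hq
          rcases List.mem_cons.mp hp with rfl | hp'
          · -- p = (a, b'): compare with everything via the dicts
            rcases hq with hq | hq
            · constructor
              · intro e
                have hq2 := (hf q.1 q.2).mpr hq
                rw [← e, hget] at hq2
                have hq3 : q.2 = b' := by injection hq2 with h'; exact h'.symm
                exact Prod.ext_iff.mpr ⟨e, hq3.symm⟩
              · intro e
                have h1 := (hb q.1 q.2).mpr hq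
                have h2 := (hb a b').mpr hmem
                rw [← e, h2] at h1
                have hq1 : q.1 = a := by injection h1 with h'; exact h'.symm
                exact Prod.ext_iff.mpr ⟨hq1.symm, e⟩
            · rcases List.mem_cons.mp hq with rfl | hq'
              · exact PairCond_refl _
              · exact PairCond_symm (h q hq' (a, b') (Or.inl hmem))
          · rcases hq with hq | hq
            · exact h p hp' q (Or.inl hq)
            · rcases List.mem_cons.mp hq with rfl | hq'
              · exact h p hp' (a, b') (Or.inl hmem)
              · exact h p hp' q (Or.inr hq')
        · intro h p hp q hq
          refine h p (List.mem_cons_of_mem _ hp) q ?_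
          rcases hq with hq | hq
          · exact Or.inl hq
          · exact Or.inr (List.mem_cons_of_mem _ hq)
      · rw [if_pos hbb]
        have hmem : (a, b') ∈ seen := (hf a b').mp hget
        constructor
        · intro h; exact absurd h (by simp)
        · intro h
          have hc := h (a, b) List.mem_cons_self (a, b') (Or.inl hmem)
          have heq := hc.1 rfl
          have : b = b' := congrArg Prod.snd heq
          exact absurd this.symm hbb
    | none =>
      dsimp only
      rw [PySem.Dict.contains_eq_isSome_get?]
      cases hbget : bwd.get? b with
      | some a' =>
        have hmem : (a', b) ∈ seen := (hb a' b).mp hbget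
        have hne : a' ≠ a := by
          intro e; subst e
          have := (hf a' b).mpr hmem
          rw [hget] at this; simp at this
        rw [if_pos (by simp)]
        constructor
        · intro h; exact absurd h (by simp)
        · intro h
          have hc := h (a, b) List.mem_cons_self (a', b) (Or.inl hmem)
          have heq := hc.2 rfl
          exact absurd (congrArg Prod.fst heq).symm hne
      | none =>
        rw [if_neg (by simp)]
        have hf' : ∀ x y, (fwd.insert a b).get? x = some y ↔ (x, y) ∈ (a, b) :: seen := by
          intro x y
          rw [PySem.Dict.get?_insert]
          by_cases hx : x = a
          · subst hx
            rw [if_pos rfl]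
            constructor
            · intro e
              injection e with e2
              exact List.mem_cons.mpr (Or.inl (Prod.ext_iff.mpr ⟨rfl, e2.symm⟩))
            · intro hm
              rcases List.mem_cons.mp hm with e | hmem'
              · exact congrArg some ((Prod.ext_iff.mp e).2).symm
              · have := (hf x y).mpr hmem'; rw [hget] at this; simp at this
          · rw [if_neg hx, hf x y]
            simp only [List.mem_cons]
            constructor
            · exact Or.inr
            · rintro (e | hmem')
              · exact absurd (congrArg Prod.fst e) hx
              · exact hmem'
        have hb' : ∀ x y, (bwd.insert b a).get? y = some x ↔ (x, y) ∈ (a, b) :: seen := by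
          intro x y
          rw [PySem.Dict.get?_insert]
          by_cases hy : y = b
          · subst hy
            rw [if_pos rfl]
            constructor
            · intro e
              injection e with e1
              exact List.mem_cons.mpr (Or.inl (Prod.ext_iff.mpr ⟨e1.symm, rfl⟩))
            · intro hm
              rcases List.mem_cons.mp hm with e | hmem'
              · exact congrArg some ((Prod.ext_iff.mp e).1).symm
              · have := (hb x y).mpr hmem'; rw [hbget] at this; simp at this
          · rw [if_neg hy, hb x y]
            simp only [List.mem_cons]
            constructor
            · exact Or.inr
            · rintro (e | hmem')
              · exact absurd (congrArg Prod.snd e) hy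
              · exact hmem'
        rw [ih _ _ _ hf' hb']
        constructor
        · intro h p hp q hq
          rcases List.mem_cons.mp hp with rfl | hp'
          · rcases hq with hq | hq
            · -- q ∈ seen, and a, b are fresh
              constructor
              · intro e
                have := (hf q.1 q.2).mpr hq
                rw [← e, hget] at this; simp at this
              · intro e
                have := (hb q.1 q.2).mpr hq
                rw [← e, hbget] at this; simp at this
            · rcases List.mem_cons.mp hq with rfl | hq'
              · exact PairCond_refl _
              · exact PairCond_symm (h q hq' (a, b) (Or.inl List.mem_cons_self))
          · rcases hq with hq | hq
            · exact h p hp' q (Or.inl (List.mem_cons_of_mem _ hq))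
            · rcases List.mem_cons.mp hq with rfl | hq'
              · exact h p hp' (a, b) (Or.inl List.mem_cons_self)
              · exact h p hp' q (Or.inr hq')
        · intro h p hp q hq
          refine h p (List.mem_cons_of_mem _ hp) q ?_
          rcases hq with hq | hq
          · rcases List.mem_cons.mp hq with rfl | hq'
            · exact Or.inr List.mem_cons_self
            · exact Or.inl hq'
          · exact Or.inr (List.mem_cons_of_mem _ hq)

theorem alt_iff_good (l1 l2 : List Int) (hlen : l1.length = l2.length) :
    are_lists_isomorphic_py_alt l1 l2 = true ↔ Good (l1.zip l2) := by
  unfold are_lists_isomorphic_py_alt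
  rw [if_neg (by simpa using hlen)]
  rw [isoLoop_iff _ _ _ []
      (by intro a b; simp [PySem.Dict.get?_empty])
      (by intro a b; simp [PySem.Dict.get?_empty])]
  unfold Good
  simp

-- A side: cardinality of a PySem set as a Finset card
theorem set_len_eq_card {α : Type} [BEq α] [LawfulBEq α] [DecidableEq α] (l : List α) :
    (PySem.Set.ofList l).length = l.toFinset.card := by
  have h1 : (PySem.Set.ofList l).toFinset = l.toFinset := by
    ext x; simp [List.mem_toFinset, PySem.Set.mem_ofList]
  rw [← h1, List.toFinset_card_of_nodup (PySem.Set.nodup_ofList l)]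

theorem a_iff_good (l1 l2 : List Int) (hlen : l1.length = l2.length) :
    are_lists_isomorphic_py l1 l2 = true ↔ Good (l1.zip l2) := by
  unfold are_lists_isomorphic_py
  rw [if_neg (by simpa using hlen)]
  set z := l1.zip l2 with hz
  have hfst : z.map Prod.fst = l1 := List.map_fst_zip (le_of_eq hlen)
  have hsnd : z.map Prod.snd = l2 := List.map_snd_zip (le_of_eq hlen.symm)
  have himg1 : z.toFinset.image Prod.fst = l1.toFinset := by
    rw [← hfst]; ext x; simp
  have himg2 : z.toFinset.image Prod.snd = l2.toFinset := by
    rw [← hsnd]; ext x; simp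
  simp only [set_len_eq_card]
  have hgood : (Set.InjOn Prod.fst (↑z.toFinset : Set (Int × Int)) ∧ Set.InjOn Prod.snd (↑z.toFinset : Set (Int × Int))) ↔ Good z := by
    constructor
    · rintro ⟨h1, h2⟩ p hp q hq
      exact ⟨fun e => h1 (by simpa using hp) (by simpa using hq) e,
             fun e => h2 (by simpa using hp) (by simpa using hq) e⟩
    · intro h
      constructor
      · intro p hp q hq e
        exact (h p (by simpa using hp) q (by simpa using hq)).1 e
      · intro p hp q hq e
        exact (h p (by simpa using hp) q (by simpa using hq)).2 e
  constructor
  · intro hA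
    by_cases hcards : l1.toFinset.card = l2.toFinset.card
    · rw [if_neg (by simpa using hcards)] at hA
      have hzeq : l1.toFinset.card = z.toFinset.card := by
        have := of_decide_eq_true (by simpa using hA)
        exact this
      refine hgood.mp ⟨?_, ?_⟩
      · exact Finset.card_image_iff.mp (by rw [himg1, ← hzeq])
      · exact Finset.card_image_iff.mp (by rw [himg2, ← hcards, ← hzeq])
    · rw [if_pos (by simpa using hcards)] at hA
      exact absurd hA (by simp)
  · intro hG
    obtain ⟨h1, h2⟩ := hgood.mpr hG
    have hc1 : l1.toFinset.card = z.toFinset.card := by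
      rw [← himg1]; exact Finset.card_image_iff.mpr h1
    have hc2 : l2.toFinset.card = z.toFinset.card := by
      rw [← himg2]; exact Finset.card_image_iff.mpr h2
    rw [if_neg (by simp [hc1, hc2])]
    simpa using hc1

-- ===== VERDICT (by name: the statement is the Claim_ definition above) =====
theorem are_lists_isomorphic_py_spec : Claim_equal_are_lists_isomorphic_py := by
  intro l1 l2 _
  unfold Spec_are_lists_isomorphic_py
  by_cases hlen : l1.length = l2.length
  · have hA := a_iff_good l1 l2 hlen
    have hB := alt_iff_good l1 l2 hlen
    cases hA' : are_lists_isomorphic_py l1 l2 <;>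
      cases hB' : are_lists_isomorphic_py_alt l1 l2 <;> simp_all
  · unfold are_lists_isomorphic_py are_lists_isomorphic_py_alt
    rw [if_pos (by simpa using hlen), if_pos (by simpa using hlen)]
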